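-- pv_equiv track=rewrite | github.com/cjb230/riddler | 20190913_classic.py | sift_set
-- ===== SOURCE A (Python) =====
-- def sift_set(full_set):
--     longest_string_length = 0
--     return_set = set()
--     for states_string in full_set:
--         if len(states_string) > longest_string_length:
--             longest_string_length = len(states_string)
--     for states_string in full_set:
--         if len(states_string) == longest_string_length:
--             return_set.add(states_string)
--     return return_set
-- ===== SOURCE B (Python) =====
-- def sift_set(full_set):
--     longest_length = 0
--     return_set = set()
--     for s in full_set:
--         if len(s) > longest_length:
--             longest_length = len(s)
--             return_set = {s}
--         elif len(s) == longest_length: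
--             return_set.add(s)
--     return return_set
-- ===== Notes on version B (the rewrite author's own statement) =====
-- stated objective: alternative
-- what changed: Fused A's two passes (max-length scan, then filter scan) into one invariant-maintaining pass that resets the result set whenever a strictly longer string appears.
import Mathlib
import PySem

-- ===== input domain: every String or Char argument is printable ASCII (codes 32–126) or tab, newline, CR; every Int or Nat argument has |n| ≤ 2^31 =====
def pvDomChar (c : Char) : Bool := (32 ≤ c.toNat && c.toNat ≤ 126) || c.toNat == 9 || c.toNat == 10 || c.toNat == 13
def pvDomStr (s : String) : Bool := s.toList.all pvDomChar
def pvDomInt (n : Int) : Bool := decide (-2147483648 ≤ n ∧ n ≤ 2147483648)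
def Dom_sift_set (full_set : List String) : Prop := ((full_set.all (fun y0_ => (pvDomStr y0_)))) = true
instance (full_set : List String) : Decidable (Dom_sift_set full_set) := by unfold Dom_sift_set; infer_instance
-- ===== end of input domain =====

-- B fuses A's two passes (max-length scan, then filter scan) into one pass that
-- resets the accumulated set whenever a strictly longer string appears (objective: alternative single-pass decomposition).


-- ===== PORT A =====
def sift_set (full_set : List String) : List String :=
  let longest_string_length : Int :=
    full_set.foldl (fun m s => if PySem.Str.len s > m then PySem.Str.len s else m) 0
  full_set.foldl
    (fun rs s => if PySem.Str.len s = longest_string_length then PySem.Set.add rs s else rs)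
    PySem.Set.empty

-- ===== PORT B =====
def sift_set_alt (full_set : List String) : List String :=
  (full_set.foldl
    (fun (st : Int × PySem.Set String) s =>
      if PySem.Str.len s > st.1 then (PySem.Str.len s, PySem.Set.add PySem.Set.empty s)
      else if PySem.Str.len s = st.1 then (st.1, PySem.Set.add st.2 s)
      else st)
    (0, PySem.Set.empty)).2

-- ===== PRECONDITION & SPEC =====
def Spec_sift_set (full_set : List String) (out : List String) : Prop := out = sift_set_alt full_set
instance (full_set : List String) (out : List String) : Decidable (Spec_sift_set full_set out) := by unfold Spec_sift_set; infer_instance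

-- ===== CLAIM (what is proved, stated in full; the proofs are below) =====
def Claim_equal_sift_set : Prop := ∀ (full_set : List String), Dom_sift_set full_set → Spec_sift_set full_set (sift_set full_set)

-- ===== LEMMAS AND PROOFS =====

-- A's first loop, as a named function of the list
def pvMaxLen (l : List String) : Int :=
  l.foldl (fun m s => if PySem.Str.len s > m then PySem.Str.len s else m) 0

-- A's second loop, with an arbitrary target length M
def pvSel (M : Int) (l : List String) : PySem.Set String :=
  l.foldl (fun rs s => if PySem.Str.len s = M then PySem.Set.add rs s else rs) PySem.Set.empty

lemma pvMaxLen_append (l : List String) (x : String) :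
    pvMaxLen (l ++ [x]) =
      if PySem.Str.len x > pvMaxLen l then PySem.Str.len x else pvMaxLen l := by
  simp [pvMaxLen, List.foldl_append]

lemma le_pvMaxLen (l : List String) {s : String} (h : s ∈ l) :
    PySem.Str.len s ≤ pvMaxLen l := by
  unfold pvMaxLen
  suffices H : ∀ (m : Int), m ≤ l.foldl (fun m s => if PySem.Str.len s > m then PySem.Str.len s else m) m ∧
      (s ∈ l → PySem.Str.len s ≤ l.foldl (fun m s => if PySem.Str.len s > m then PySem.Str.len s else m) m) from
    (H 0).2 h
  clear h
  induction l with
  | nil => intro m; simp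
  | cons a t ih =>
    intro m
    constructor
    · simp only [List.foldl_cons]
      split_ifs with hgt
      · exact le_of_lt (lt_of_lt_of_le hgt (ih (PySem.Str.len a)).1)
      · exact (ih m).1
    · intro hmem
      rcases List.mem_cons.mp hmem with rfl | hmem
      · simp only [List.foldl_cons]
        split_ifs with hgt
        · exact (ih (PySem.Str.len s)).1
        · exact le_trans (le_of_not_gt hgt) (ih m).1
      · simp only [List.foldl_cons]
        split_ifs with hgt
        · exact (ih (PySem.Str.len a)).2 hmem
        · exact (ih m).2 hmem

lemma pvSel_append (M : Int) (l : List String) (x : String) :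
    pvSel M (l ++ [x]) =
      if PySem.Str.len x = M then PySem.Set.add (pvSel M l) x else pvSel M l := by
  simp [pvSel, List.foldl_append]

lemma pvSel_empty_of (M : Int) (l : List String)
    (h : ∀ s ∈ l, PySem.Str.len s ≠ M) : pvSel M l = PySem.Set.empty := by
  induction l using List.reverseRecOn with
  | nil => rfl
  | append_singleton t x ih =>
    rw [pvSel_append, if_neg (h x (by simp))]
    exact ih (fun s hs => h s (by simp [hs]))

lemma alt_invariant (l : List String) :
    l.foldl
      (fun (st : Int × PySem.Set String) s =>
        if PySem.Str.len s > st.1 then (PySem.Str.len s, PySem.Set.add PySem.Set.empty s)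
        else if PySem.Str.len s = st.1 then (st.1, PySem.Set.add st.2 s)
        else st)
      (0, PySem.Set.empty) = (pvMaxLen l, pvSel (pvMaxLen l) l) := by
  induction l using List.reverseRecOn with
  | nil => rfl
  | append_singleton t x ih =>
    rw [List.foldl_append, ih]
    simp only [List.foldl_cons, List.foldl_nil]
    by_cases hgt : PySem.Str.len x > pvMaxLen t
    · rw [if_pos hgt, pvMaxLen_append, if_pos hgt, pvSel_append, if_pos rfl,
        pvSel_empty_of (PySem.Str.len x) t
          (fun s hs => ne_of_lt (lt_of_le_of_lt (le_pvMaxLen t hs) hgt))]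
    · rw [if_neg hgt, pvMaxLen_append, if_neg hgt, pvSel_append]
      by_cases heq : PySem.Str.len x = pvMaxLen t
      · rw [if_pos heq, if_pos heq]
      · rw [if_neg heq, if_neg heq]

-- ===== VERDICT (by name: the statement is the Claim_ definition above) =====
theorem sift_set_spec : Claim_equal_sift_set := by
  intro l _
  show sift_set l = sift_set_alt l
  rw [sift_set_alt, alt_invariant]
  rfl
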